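-- pv_equiv track=rewrite | github.com/ahsas257-glitc/WASH_Pro | src/Tools/steps/step_6_executive_summary.py | _simple_diff
-- ===== SOURCE A (Python) =====
-- from typing import Any, Dict, List, Optional, Tuple
--
-- def _simple_diff(a: str, b: str, max_lines: int = 120) -> str:
--     a_lines = (a or "").splitlines()
--     b_lines = (b or "").splitlines()
--
--     out: List[str] = []
--     out.append("Legend: - removed | + added |   unchanged")
--     out.append("")
--
--     i = 0
--     j = 0
--     while i < len(a_lines) and j < len(b_lines) and len(out) < max_lines:
--         if a_lines[i] == b_lines[j]:
--             out.append(f"  {a_lines[i]}")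
--             i += 1
--             j += 1
--         else:
--             out.append(f"- {a_lines[i]}")
--             out.append(f"+ {b_lines[j]}")
--             i += 1
--             j += 1
--
--     while i < len(a_lines) and len(out) < max_lines:
--         out.append(f"- {a_lines[i]}")
--         i += 1
--     while j < len(b_lines) and len(out) < max_lines:
--         out.append(f"+ {b_lines[j]}")
--         j += 1
--
--     if len(out) >= max_lines:
--         out.append("")
--         out.append("… diff truncated …")
--
--     return "\n".join(out)
-- ===== SOURCE B (Python) =====
-- def _simple_diff(a: str, b: str, max_lines: int = 120) -> str:
--     a_lines = (a or "").splitlines()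
--     b_lines = (b or "").splitlines()
--     k = min(len(a_lines), len(b_lines))
--     # Build the COMPLETE, uncapped diff first, then compute the truncation point by
--     # index arithmetic: the cap always cuts at max_lines, except that when line
--     # max_lines is the '+' half of a mismatch pair (recognisable as a '+ ' line
--     # right after a '- ' line) that pair is kept whole, so the cut is max_lines+1.
--     full = ["Legend: - removed | + added |   unchanged", ""]
--     full += [l for x, y in zip(a_lines, b_lines)
--                for l in (("  " + x,) if x == y else ("- " + x, "+ " + y))]
--     full += ["- " + x for x in a_lines[k:]]
--     full += ["+ " + y for y in b_lines[k:]]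
--     if len(full) < max_lines:
--         return "\n".join(full)
--     cut = max(2, max_lines)
--     if cut < len(full) and full[cut].startswith("+ ") and full[cut - 1].startswith("- "):
--         cut += 1
--     return "\n".join(full[:cut] + ["", "… diff truncated …"])
-- ===== Notes on version B (the rewrite author's own statement) =====
-- stated objective: alternative
-- what changed: Instead of A's three budget-tracking while-loops, B builds the complete uncapped diff in one shot and then computes the truncation point by index arithmetic: cut at max_lines, extended by one exactly when line max_lines is the '+' half of a mismatch pair (a '+ ' line right after a '- ' line).
import Mathlib
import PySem

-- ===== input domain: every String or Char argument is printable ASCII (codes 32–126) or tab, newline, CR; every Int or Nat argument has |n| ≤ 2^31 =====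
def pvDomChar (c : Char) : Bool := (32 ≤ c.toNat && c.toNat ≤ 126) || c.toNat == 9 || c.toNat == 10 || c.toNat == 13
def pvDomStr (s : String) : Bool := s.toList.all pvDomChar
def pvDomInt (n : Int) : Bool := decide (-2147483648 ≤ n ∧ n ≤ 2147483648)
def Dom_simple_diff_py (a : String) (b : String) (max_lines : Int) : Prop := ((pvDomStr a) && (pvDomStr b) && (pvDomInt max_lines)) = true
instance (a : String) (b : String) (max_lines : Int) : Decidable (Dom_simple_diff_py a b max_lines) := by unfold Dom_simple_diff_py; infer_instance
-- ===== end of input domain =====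

-- B builds the complete, uncapped diff first and then computes the truncation point by
-- index arithmetic, replacing A's three budget-tracking while-loops; equal return value, no speed claim.

-- ===== PORT A =====
-- first while loop: paired scan over a_lines/b_lines with indices i, j
def pvA_loop1 (aL bL : List String) (maxL : Int) (i j : Nat) (out : List String) :
    List String × Nat × Nat :=
  if h : i < aL.length ∧ j < bL.length ∧ (out.length : Int) < maxL then
    if aL[i] = bL[j] then
      pvA_loop1 aL bL maxL (i+1) (j+1) (out ++ ["  " ++ aL[i]])
    else
      pvA_loop1 aL bL maxL (i+1) (j+1) (out ++ ["- " ++ aL[i], "+ " ++ bL[j]])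
  else (out, i, j)
termination_by aL.length - i
decreasing_by all_goals omega

-- second while loop: remaining a_lines
def pvA_loop2 (aL : List String) (maxL : Int) (i : Nat) (out : List String) : List String :=
  if h : i < aL.length ∧ (out.length : Int) < maxL then
    pvA_loop2 aL maxL (i+1) (out ++ ["- " ++ aL[i]])
  else out
termination_by aL.length - i
decreasing_by omega

-- third while loop: remaining b_lines
def pvA_loop3 (bL : List String) (maxL : Int) (j : Nat) (out : List String) : List String :=
  if h : j < bL.length ∧ (out.length : Int) < maxL then
    pvA_loop3 bL maxL (j+1) (out ++ ["+ " ++ bL[j]])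
  else out
termination_by bL.length - j
decreasing_by omega

def simple_diff_py (a : String) (b : String) (max_lines : Int) : String :=
  let a_lines := PySem.Str.splitlines a
  let b_lines := PySem.Str.splitlines b
  let out : List String := ["Legend: - removed | + added |   unchanged", ""]
  let r1 := pvA_loop1 a_lines b_lines max_lines 0 0 out
  let out := pvA_loop2 a_lines max_lines r1.2.1 r1.1
  let out := pvA_loop3 b_lines max_lines r1.2.2 out
  let out := if (out.length : Int) ≥ max_lines then out ++ ["", "… diff truncated …"] else out
  PySem.Str.join "\n" out

-- ===== PORT B =====
-- the (1- or 2-line) lines a matched pair contributes to the uncapped diff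
def pvB_pairLines (p : String × String) : List String :=
  if p.1 = p.2 then ["  " ++ p.1] else ["- " ++ p.1, "+ " ++ p.2]

def simple_diff_py_alt (a : String) (b : String) (max_lines : Int) : String :=
  let a_lines := PySem.Str.splitlines a
  let b_lines := PySem.Str.splitlines b
  let k := min a_lines.length b_lines.length
  let full := ["Legend: - removed | + added |   unchanged", ""]
      ++ (a_lines.zip b_lines).flatMap pvB_pairLines
      ++ (a_lines.drop k).map (fun x => "- " ++ x)
      ++ (b_lines.drop k).map (fun y => "+ " ++ y)
  if (full.length : Int) < max_lines then PySem.Str.join "\n" full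
  else
    let cut0 : Int := max 2 max_lines
    -- Python's short-circuit guard 'cut < len(full)' keeps full[cut], full[cut-1] in range;
    -- pyGetD with default "" is exact here (both indices are nonnegative and in range when read)
    let cut : Int :=
      if cut0 < (full.length : Int)
          ∧ PySem.Str.startswith (PySem.List.pyGetD full cut0 "") "+ " = true
          ∧ PySem.Str.startswith (PySem.List.pyGetD full (cut0 - 1) "") "- " = true
      then cut0 + 1 else cut0
    -- full[:cut] with cut ≥ 2: slice with a nonnegative bound is take
    PySem.Str.join "\n" (full.take cut.toNat ++ ["", "… diff truncated …"])

-- ===== PRECONDITION & SPEC =====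
def Spec_simple_diff_py (a : String) (b : String) (max_lines : Int) (out : String) : Prop := out = simple_diff_py_alt a b max_lines
instance (a : String) (b : String) (max_lines : Int) (out : String) : Decidable (Spec_simple_diff_py a b max_lines out) := by unfold Spec_simple_diff_py; infer_instance

-- ===== CLAIM (what is proved, stated in full; the proofs are below) =====
def Claim_equal_simple_diff_py : Prop := ∀ (a : String) (b : String) (max_lines : Int), Dom_simple_diff_py a b max_lines → Spec_simple_diff_py a b max_lines (simple_diff_py a b max_lines)

-- ===== LEMMAS AND PROOFS =====

-- greedy truncation (proof-only model of A's loops): consume chunks while capacity not reached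
def pvB_take (maxL : Int) (out : List String) : List (List String) → List String
  | [] => out
  | ch :: rest => if (out.length : Int) < maxL then pvB_take maxL (out ++ ch) rest else out

-- once the capacity is reached, pvB_take is the identity
lemma pvB_take_stop (maxL : Int) (out : List String) (l : List (List String))
    (h : ¬ (out.length : Int) < maxL) : pvB_take maxL out l = out := by
  cases l with
  | nil => rfl
  | cons ch rest => simp [pvB_take, h]

-- pvB_take over an append splits
lemma pvB_take_append (maxL : Int) (l₁ l₂ : List (List String)) : ∀ out,
    pvB_take maxL out (l₁ ++ l₂) = pvB_take maxL (pvB_take maxL out l₁) l₂ := by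
  induction l₁ with
  | nil => intro out; rfl
  | cons ch rest ih =>
    intro out
    by_cases h : (out.length : Int) < maxL
    · simp [pvB_take, h, ih]
    · simp [pvB_take, h, pvB_take_stop maxL out l₂ h]

-- when everything fits under the cap the greedy pass emits everything
lemma pvB_take_all (maxL : Int) : ∀ (C : List (List String)) (out : List String),
    ((out.length : Int) + C.flatten.length < maxL) → pvB_take maxL out C = out ++ C.flatten := by
  intro C
  induction C with
  | nil => intro out h; simp [pvB_take]
  | cons ch rest ih =>
    intro out h
    simp only [List.flatten_cons, List.length_append, Nat.cast_add] at h
    have hc : (out.length : Int) < maxL := by omega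
    rw [pvB_take, if_pos hc, ih (out ++ ch)
      (by simp only [List.length_append, Nat.cast_add]; omega)]
    simp

lemma pvA_loop2_eq (aL : List String) (maxL : Int) : ∀ i, i ≤ aL.length → ∀ out,
    pvA_loop2 aL maxL i out = pvB_take maxL out ((aL.drop i).map (fun x => ["- " ++ x])) := by
  intro i
  induction hn : aL.length - i generalizing i with
  | zero =>
    intro hile out
    have hnil : aL.drop i = [] := List.drop_eq_nil_of_le (by omega)
    have hcond : ¬ (i < aL.length ∧ (out.length : Int) < maxL) := fun h => absurd h.1 (by omega)
    rw [pvA_loop2, dif_neg hcond, hnil, List.map_nil, pvB_take]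
  | succ n ih =>
    intro hile out
    have hi : i < aL.length := by omega
    rw [List.drop_eq_getElem_cons hi, List.map_cons]
    by_cases hc : (out.length : Int) < maxL
    · rw [pvA_loop2, dif_pos ⟨hi, hc⟩, ih (i+1) (by omega) (by omega)]
      simp only [pvB_take, if_pos hc]
    · rw [pvA_loop2, dif_neg (fun h => absurd h.2 hc)]
      simp only [pvB_take, if_neg hc]

lemma pvA_loop3_eq (bL : List String) (maxL : Int) : ∀ j, j ≤ bL.length → ∀ out,
    pvA_loop3 bL maxL j out = pvB_take maxL out ((bL.drop j).map (fun y => ["+ " ++ y])) := by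
  intro j
  induction hn : bL.length - j generalizing j with
  | zero =>
    intro hjle out
    have hnil : bL.drop j = [] := List.drop_eq_nil_of_le (by omega)
    have hcond : ¬ (j < bL.length ∧ (out.length : Int) < maxL) := fun h => absurd h.1 (by omega)
    rw [pvA_loop3, dif_neg hcond, hnil, List.map_nil, pvB_take]
  | succ n ih =>
    intro hjle out
    have hj : j < bL.length := by omega
    rw [List.drop_eq_getElem_cons hj, List.map_cons]
    by_cases hc : (out.length : Int) < maxL
    · rw [pvA_loop3, dif_pos ⟨hj, hc⟩, ih (j+1) (by omega) (by omega)]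
      simp only [pvB_take, if_pos hc]
    · rw [pvA_loop3, dif_neg (fun h => absurd h.2 hc)]
      simp only [pvB_take, if_neg hc]

-- loop 1: its output list is the greedy truncation over the zip chunks, its final
-- indices advance in lockstep, and it stops only at an end of a list or at capacity
lemma pvA_loop1_spec (aL bL : List String) (maxL : Int) : ∀ i j out,
    i ≤ aL.length → j ≤ bL.length →
    ∃ t,
      pvA_loop1 aL bL maxL i j out
        = (pvB_take maxL out (((aL.drop i).zip (bL.drop j)).map pvB_pairLines), i + t, j + t)
      ∧ i + t ≤ aL.length ∧ j + t ≤ bL.length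
      ∧ (i + t = aL.length ∨ j + t = bL.length
          ∨ ¬ ((pvA_loop1 aL bL maxL i j out).1.length : Int) < maxL) := by
  intro i
  induction hn : aL.length - i generalizing i with
  | zero =>
    intro j out hile hjle
    have hcond : ¬ (i < aL.length ∧ j < bL.length ∧ (out.length : Int) < maxL) :=
      fun h => absurd h.1 (by omega)
    refine ⟨0, ?_, by omega, by omega, Or.inl (by omega)⟩
    rw [pvA_loop1, dif_neg hcond, List.drop_eq_nil_of_le (by omega), List.zip_nil_left,
      List.map_nil, pvB_take]
    simp
  | succ n ih =>
    intro j out hile hjle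
    have hi : i < aL.length := by omega
    by_cases hrest : j < bL.length ∧ (out.length : Int) < maxL
    · obtain ⟨hj, hc⟩ := hrest
      rw [List.drop_eq_getElem_cons hi, List.drop_eq_getElem_cons hj,
        List.zip_cons_cons, List.map_cons]
      by_cases heq : aL[i] = bL[j]
      · obtain ⟨t, h1, h2, h3, h4⟩ :=
          ih (i+1) (by omega) (j+1) (out ++ ["  " ++ aL[i]]) (by omega) (by omega)
        refine ⟨t + 1, ?_, by omega, by omega, ?_⟩
        · rw [pvA_loop1, dif_pos ⟨hi, hj, hc⟩, if_pos heq, h1,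
            show i + (t + 1) = i + 1 + t from by omega,
            show j + (t + 1) = j + 1 + t from by omega]
          simp only [pvB_pairLines, if_pos heq, pvB_take, if_pos hc]
        · rw [pvA_loop1, dif_pos ⟨hi, hj, hc⟩, if_pos heq]
          rcases h4 with h | h | h
          · exact Or.inl (by omega)
          · exact Or.inr (Or.inl (by omega))
          · exact Or.inr (Or.inr h)
      · obtain ⟨t, h1, h2, h3, h4⟩ :=
          ih (i+1) (by omega) (j+1) (out ++ ["- " ++ aL[i], "+ " ++ bL[j]]) (by omega) (by omega)
        refine ⟨t + 1, ?_, by omega, by omega, ?_⟩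
        · rw [pvA_loop1, dif_pos ⟨hi, hj, hc⟩, if_neg heq, h1,
            show i + (t + 1) = i + 1 + t from by omega,
            show j + (t + 1) = j + 1 + t from by omega]
          simp only [pvB_pairLines, if_neg heq, pvB_take, if_pos hc]
        · rw [pvA_loop1, dif_pos ⟨hi, hj, hc⟩, if_neg heq]
          rcases h4 with h | h | h
          · exact Or.inl (by omega)
          · exact Or.inr (Or.inl (by omega))
          · exact Or.inr (Or.inr h)
    · have hcond : ¬ (i < aL.length ∧ j < bL.length ∧ (out.length : Int) < maxL) :=
        fun h => hrest ⟨h.2.1, h.2.2⟩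
      have hres : pvA_loop1 aL bL maxL i j out = (out, i, j) := by
        rw [pvA_loop1, dif_neg hcond]
      rcases not_and_or.mp hrest with hj | hc
      · have hjeq : j = bL.length := by omega
        refine ⟨0, ?_, by omega, by omega, Or.inr (Or.inl (by omega))⟩
        rw [hres, List.drop_eq_nil_of_le (le_of_eq hjeq.symm), List.zip_nil_right,
          List.map_nil, pvB_take]
        simp
      · refine ⟨0, ?_, by omega, by omega, Or.inr (Or.inr (by rw [hres]; exact hc))⟩
        rw [hres, pvB_take_stop maxL out _ hc]
        simp

-- startswith facts about the three line prefixes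
lemma pv_sw_minus (x : String) : PySem.Str.startswith ("- " ++ x) "- " = true := by
  simp [PySem.Chars.startswith_iff]

lemma pv_sw_plus_plus (x : String) : PySem.Str.startswith ("+ " ++ x) "+ " = true := by
  simp [PySem.Chars.startswith_iff]

lemma pv_sw_plus_not_minus (x : String) : PySem.Str.startswith ("+ " ++ x) "- " = false := by
  rw [Bool.eq_false_iff]; intro h
  rw [PySem.Str.startswith_eq, PySem.Chars.startswith_iff] at h
  simp [List.cons_prefix_cons] at h

lemma pv_sw_sp_not_minus (x : String) : PySem.Str.startswith ("  " ++ x) "- " = false := by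
  rw [Bool.eq_false_iff]; intro h
  rw [PySem.Str.startswith_eq, PySem.Chars.startswith_iff] at h
  simp [List.cons_prefix_cons] at h



-- reading the uncapped diff at an index given as the length of an explicit prefix
lemma pv_pyGetD_at (l1 l2 : List String) (x d : String) (i : Int) (h : i = (l1.length : Int)) :
    PySem.List.pyGetD (l1 ++ x :: l2) i d = x := by
  subst h; rw [PySem.List.pyGetD_natCast]; simp [List.getD]

-- reading the uncapped diff at the start of the next chunk
lemma pv_pyGetD_flat_head (l1 : List String) (r0 : List String) (rest' : List (List String))
    (d : String) (h : r0 ≠ []) (i : Int) (hi : i = (l1.length : Int)) :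
    PySem.List.pyGetD (l1 ++ (r0 :: rest').flatten) i d = r0.head?.getD "" := by
  cases r0 with
  | nil => cases h rfl
  | cons s r0t =>
    rw [List.flatten_cons,
      show l1 ++ ((s :: r0t) ++ rest'.flatten) = l1 ++ s :: (r0t ++ rest'.flatten) from by simp,
      pv_pyGetD_at l1 _ s d i hi]
    simp

-- shapes of the chunks the diff is made of, and the adjacency fact B's probe relies on
def pvOkChunk (ch : List String) : Prop :=
  (∃ x, ch = ["  " ++ x]) ∨ (∃ x, ch = ["- " ++ x]) ∨ (∃ y, ch = ["+ " ++ y]) ∨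
  (∃ x y, ch = ["- " ++ x, "+ " ++ y])

def pvChainR (c1 c2 : List String) : Prop :=
  PySem.Str.startswith (c1.getLast?.getD "") "- " = true →
  PySem.Str.startswith (c2.head?.getD "") "+ " = false

-- THE KEY LEMMA: on chunk lists of the diff's shape, greedy truncation equals
-- "take maxL, plus one more line exactly when line maxL is a '+ ' right after a '- '"
lemma pvB_take_cut (maxL : Int) : ∀ (C : List (List String)) (out : List String),
    (∀ ch ∈ C, pvOkChunk ch) → (∀ c1 ∈ C, ∀ c2 ∈ C, pvChainR c1 c2) →
    ((out.length : Int) < maxL) → (maxL ≤ ((out ++ C.flatten).length : Int)) →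
    pvB_take maxL out C =
      (out ++ C.flatten).take
        (if maxL < ((out ++ C.flatten).length : Int)
            ∧ PySem.Str.startswith (PySem.List.pyGetD (out ++ C.flatten) maxL "") "+ " = true
            ∧ PySem.Str.startswith (PySem.List.pyGetD (out ++ C.flatten) (maxL - 1) "") "- " = true
         then maxL.toNat + 1 else maxL.toNat) := by
  intro C
  induction C with
  | nil =>
    intro out _ _ hout htot
    simp only [List.flatten_nil, List.append_nil] at htot
    omega
  | cons ch rest ih =>
    intro out hok hch hout htot
    have hassoc : out ++ (ch :: rest).flatten = (out ++ ch) ++ rest.flatten := by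
      simp [List.flatten_cons]
    rw [pvB_take, if_pos hout]
    by_cases hfit : ((out ++ ch).length : Int) < maxL
    · rw [hassoc,
        ih (out ++ ch) (fun c hc => hok c (List.mem_cons_of_mem _ hc))
          (fun c1 h1 c2 h2 => hch c1 (List.mem_cons_of_mem _ h1) c2 (List.mem_cons_of_mem _ h2))
          hfit (by rw [hassoc] at htot; exact htot)]
    · -- the greedy pass stops right after this chunk
      rw [pvB_take_stop maxL (out ++ ch) rest hfit, hassoc]
      have hLen : (out ++ ch).length = out.length + ch.length := List.length_append ..
      rcases hok ch List.mem_cons_self with ⟨x, hx⟩ | ⟨x, hx⟩ | ⟨y, hy⟩ | ⟨x, y, hxy⟩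
      -- unchanged singleton "  x"
      · subst hx
        have hm : maxL = (out.length : Int) + 1 := by simp at hfit; omega
        cases rest with
        | nil =>
          rw [if_neg (fun hcond => absurd hcond.1 (by simp; omega)), List.take_of_length_le (by simp; omega)]
          simp
        | cons r0 rest' =>
          have h3 : PySem.List.pyGetD ((out ++ ["  " ++ x]) ++ (r0 :: rest').flatten) (maxL - 1) ""
              = "  " ++ x := by
            rw [show (out ++ ["  " ++ x]) ++ (r0 :: rest').flatten
                = out ++ ("  " ++ x) :: (r0 :: rest').flatten from by simp]
            exact pv_pyGetD_at _ _ _ _ _ (by omega)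
          rw [if_neg (by rintro ⟨-, -, hc3⟩; rw [h3, pv_sw_sp_not_minus] at hc3; cases hc3),
            List.take_append_of_le_length (by simp; omega),
            List.take_of_length_le (by simp; omega)]
      -- removed singleton "- x"
      · subst hx
        have hm : maxL = (out.length : Int) + 1 := by simp at hfit; omega
        cases rest with
        | nil =>
          rw [if_neg (fun hcond => absurd hcond.1 (by simp; omega)), List.take_of_length_le (by simp; omega)]
          simp
        | cons r0 rest' =>
          -- by the adjacency property the next chunk cannot start with '+ '
          have hR : pvChainR ["- " ++ x] r0 :=
            hch _ List.mem_cons_self _ (List.mem_cons_of_mem _ (List.mem_cons_self))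
          have hlast : (["- " ++ x] : List String).getLast?.getD "" = "- " ++ x := by simp
          have hhead : PySem.Str.startswith (r0.head?.getD "") "+ " = false := by
            apply hR; rw [hlast]; exact pv_sw_minus x
          have hr0ne : r0 ≠ [] := by
            rcases hok r0 (List.mem_cons_of_mem _ List.mem_cons_self) with
              ⟨u, hu⟩ | ⟨u, hu⟩ | ⟨u, hu⟩ | ⟨u, v, huv⟩ <;> subst_vars <;> simp
          have h2 : PySem.List.pyGetD ((out ++ ["- " ++ x]) ++ (r0 :: rest').flatten) maxL ""
              = r0.head?.getD "" :=
            pv_pyGetD_flat_head (out ++ ["- " ++ x]) r0 rest' "" hr0ne maxL (by simp; omega)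
          rw [if_neg (by rintro ⟨-, hc2, -⟩; rw [h2, hhead] at hc2; cases hc2),
            List.take_append_of_le_length (by simp; omega),
            List.take_of_length_le (by simp; omega)]
      -- added singleton "+ y"
      · subst hy
        have hm : maxL = (out.length : Int) + 1 := by simp at hfit; omega
        cases rest with
        | nil =>
          rw [if_neg (fun hcond => absurd hcond.1 (by simp; omega)), List.take_of_length_le (by simp; omega)]
          simp
        | cons r0 rest' =>
          have h3 : PySem.List.pyGetD ((out ++ ["+ " ++ y]) ++ (r0 :: rest').flatten) (maxL - 1) ""
              = "+ " ++ y := by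
            rw [show (out ++ ["+ " ++ y]) ++ (r0 :: rest').flatten
                = out ++ ("+ " ++ y) :: (r0 :: rest').flatten from by simp]
            exact pv_pyGetD_at _ _ _ _ _ (by omega)
          rw [if_neg (by rintro ⟨-, -, hc3⟩; rw [h3, pv_sw_plus_not_minus] at hc3; cases hc3),
            List.take_append_of_le_length (by simp; omega),
            List.take_of_length_le (by simp; omega)]
      -- mismatch pair ["- x", "+ y"]
      · subst hxy
        have hm : maxL = (out.length : Int) + 1 ∨ maxL = (out.length : Int) + 2 := by
          simp at hfit; omega
        rcases hm with hm | hm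
        · -- overshoot: line maxL is the '+ ' half, keep the pair whole
          have h2 : PySem.List.pyGetD ((out ++ ["- " ++ x, "+ " ++ y]) ++ rest.flatten) maxL ""
              = "+ " ++ y := by
            rw [show (out ++ ["- " ++ x, "+ " ++ y]) ++ rest.flatten
                = (out ++ ["- " ++ x]) ++ ("+ " ++ y) :: rest.flatten from by simp]
            exact pv_pyGetD_at _ _ _ _ _ (by simp; omega)
          have h3 : PySem.List.pyGetD ((out ++ ["- " ++ x, "+ " ++ y]) ++ rest.flatten) (maxL - 1) ""
              = "- " ++ x := by
            rw [show (out ++ ["- " ++ x, "+ " ++ y]) ++ rest.flatten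
                = out ++ ("- " ++ x) :: ("+ " ++ y) :: rest.flatten from by simp]
            exact pv_pyGetD_at _ _ _ _ _ (by omega)
          rw [if_pos ⟨by simp only [List.length_append, List.length_cons, List.length_nil,
                Nat.cast_add, Nat.cast_zero, Nat.cast_one]; omega,
              by rw [h2]; exact pv_sw_plus_plus y,
              by rw [h3]; exact pv_sw_minus x⟩,
            show maxL.toNat + 1 = (out ++ ["- " ++ x, "+ " ++ y]).length from by simp; omega,
            List.take_left]
        · -- the pair ends exactly at the cap
          cases rest with
          | nil =>
            rw [if_neg (fun hcond => absurd hcond.1 (by simp; omega)), List.take_of_length_le (by simp; omega)]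
            simp
          | cons r0 rest' =>
            have h3 : PySem.List.pyGetD ((out ++ ["- " ++ x, "+ " ++ y]) ++ (r0 :: rest').flatten) (maxL - 1) ""
                = "+ " ++ y := by
              rw [show (out ++ ["- " ++ x, "+ " ++ y]) ++ (r0 :: rest').flatten
                  = (out ++ ["- " ++ x]) ++ ("+ " ++ y) :: (r0 :: rest').flatten from by simp]
              exact pv_pyGetD_at _ _ _ _ _ (by simp; omega)
            rw [if_neg (by rintro ⟨-, -, hc3⟩; rw [h3, pv_sw_plus_not_minus] at hc3; cases hc3),
              List.take_append_of_le_length (by simp; omega),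
              List.take_of_length_le (by simp; omega)]

-- flatten of singleton chunks is the underlying map
lemma pv_flatten_singleton (l : List String) (f : String → String) :
    (l.map (fun x => [f x])).flatten = l.map f := by
  induction l with
  | nil => rfl
  | cons x xs ih => simp [ih]

-- ===== VERDICT (by name: the statement is the Claim_ definition above) =====
theorem simple_diff_py_spec : Claim_equal_simple_diff_py := by
  intro a b maxL _
  unfold Spec_simple_diff_py simple_diff_py simple_diff_py_alt
  simp only []
  set aL := PySem.Str.splitlines a with haL
  set bL := PySem.Str.splitlines b with hbL
  set out0 : List String := ["Legend: - removed | + added |   unchanged", ""] with hout0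
  set k := min aL.length bL.length with hk
  set Z := (aL.zip bL).map pvB_pairLines with hZ
  set M := (aL.drop k).map (fun x => ["- " ++ x]) with hM
  set P := (bL.drop k).map (fun y => ["+ " ++ y]) with hP
  set C := Z ++ M ++ P with hC
  -- A's three loops compute the greedy truncation over C
  obtain ⟨t, h1, h2, h3, h4⟩ := pvA_loop1_spec aL bL maxL 0 0 out0 (Nat.zero_le _) (Nat.zero_le _)
  simp only [Nat.zero_add, List.drop_zero] at h1 h2 h3 h4
  have hAgreedy :
      pvA_loop3 bL maxL (pvA_loop1 aL bL maxL 0 0 out0).2.2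
        (pvA_loop2 aL maxL (pvA_loop1 aL bL maxL 0 0 out0).2.1 (pvA_loop1 aL bL maxL 0 0 out0).1)
      = pvB_take maxL out0 C := by
    rw [h1]
    set out1 := pvB_take maxL out0 Z with hout1
    rw [pvA_loop2_eq aL maxL t h2 out1]
    have htailA : pvB_take maxL out1 ((aL.drop t).map (fun x => ["- " ++ x]))
        = pvB_take maxL out1 M := by
      rcases h4 with h | h | h
      · rw [hM, show k = t from by omega]
      · rw [hM, show k = t from by omega]
      · rw [h1] at h
        rw [pvB_take_stop maxL out1 _ h, pvB_take_stop maxL out1 _ h]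
    rw [htailA]
    set out2 := pvB_take maxL out1 M with hout2
    rw [pvA_loop3_eq bL maxL t h3 out2]
    have htailB : pvB_take maxL out2 ((bL.drop t).map (fun y => ["+ " ++ y]))
        = pvB_take maxL out2 P := by
      rcases h4 with h | h | h
      · rw [hP, show k = t from by omega]
      · rw [hP, show k = t from by omega]
      · rw [h1] at h
        have hout2eq : out2 = out1 := by rw [hout2, pvB_take_stop maxL out1 _ h]
        rw [hout2eq, pvB_take_stop maxL out1 _ h, pvB_take_stop maxL out1 _ h]
    rw [htailB, hC, pvB_take_append, pvB_take_append]
  rw [hAgreedy]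
  -- B's uncapped diff is out0 ++ C.flatten
  have hfull : out0 ++ (aL.zip bL).flatMap pvB_pairLines
      ++ (aL.drop k).map (fun x => "- " ++ x) ++ (bL.drop k).map (fun y => "+ " ++ y)
      = out0 ++ C.flatten := by
    rw [hC, List.flatten_append, List.flatten_append, hZ, hM, hP, ← List.flatMap_def,
      pv_flatten_singleton, pv_flatten_singleton]
    simp [List.append_assoc]
  rw [hfull]
  set full := out0 ++ C.flatten with hfulldef
  by_cases hlt : (full.length : Int) < maxL
  · -- everything fits: no truncation on either side
    have hall : pvB_take maxL out0 C = full := by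
      rw [pvB_take_all maxL C out0 (by rw [hfulldef] at hlt; simp at hlt ⊢; omega)]
    rw [hall, if_pos hlt, if_neg (by omega)]
  · rw [if_neg hlt]
    have hge : maxL ≤ (full.length : Int) := by omega
    have hout0len : out0.length = 2 := rfl
    by_cases hm2 : maxL ≤ 2
    · -- degenerate cap: only the header survives, the probe cannot fire on line 1 = ""
      have hstopped : pvB_take maxL out0 C = out0 :=
        pvB_take_stop maxL out0 C (by rw [hout0len]; omega)
      have hcut0 : max 2 maxL = 2 := by omega
      have hprobe : ¬ (max 2 maxL < (full.length : Int)
          ∧ PySem.Str.startswith (PySem.List.pyGetD full (max 2 maxL) "") "+ " = true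
          ∧ PySem.Str.startswith (PySem.List.pyGetD full (max 2 maxL - 1) "") "- " = true) := by
        rintro ⟨-, -, hc3⟩
        rw [hcut0] at hc3
        rw [show full = ["Legend: - removed | + added |   unchanged"] ++ "" :: C.flatten
            from by simp [hfulldef, hout0]] at hc3
        rw [pv_pyGetD_at _ _ _ _ _ (by simp)] at hc3
        exact absurd hc3 (by decide)
      rw [hstopped, if_neg hprobe, hcut0,
        show ((2 : Int)).toNat = out0.length from rfl, hfulldef, List.take_left,
        if_pos (by rw [hout0len]; omega)]
    · -- real cap: the key lemma gives exactly B's arithmetic cut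
      have hm3 : 2 < maxL := by omega
      have hok : ∀ ch ∈ C, pvOkChunk ch := by
        intro ch hc
        rw [hC] at hc
        rcases List.mem_append.mp hc with hc | hc
        · rcases List.mem_append.mp hc with hc | hc
          · obtain ⟨p, -, hp⟩ := List.mem_map.mp hc
            rw [← hp]; unfold pvB_pairLines pvOkChunk
            by_cases hpq : p.1 = p.2
            · rw [if_pos hpq]; exact Or.inl ⟨p.1, rfl⟩
            · rw [if_neg hpq]; exact Or.inr (Or.inr (Or.inr ⟨p.1, p.2, rfl⟩))
          · obtain ⟨x, -, hx⟩ := List.mem_map.mp hc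
            exact Or.inr (Or.inl ⟨x, hx.symm⟩)
        · obtain ⟨y, -, hy⟩ := List.mem_map.mp hc
          exact Or.inr (Or.inr (Or.inl ⟨y, hy.symm⟩))
      have hch : ∀ c1 ∈ C, ∀ c2 ∈ C, pvChainR c1 c2 := by
        -- the two tails cannot both be nonempty, so either no chunk starts with '+ '
        -- or no chunk ends with a '- ' line
        intro c1 h1 c2 h2
        by_cases hab : aL.length ≤ bL.length
        · have hMnil : M = [] := by
            rw [hM, List.drop_eq_nil_of_le (by omega), List.map_nil]
          intro hlast
          exfalso
          rw [hC, hMnil, List.append_nil] at h1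
          rcases List.mem_append.mp h1 with h1 | h1
          · obtain ⟨p, -, hp⟩ := List.mem_map.mp h1
            rw [← hp] at hlast
            unfold pvB_pairLines at hlast
            by_cases hpq : p.1 = p.2
            · rw [if_pos hpq] at hlast
              simp [PySem.Chars.startswith_iff, List.cons_prefix_cons] at hlast
            · rw [if_neg hpq] at hlast
              simp [PySem.Chars.startswith_iff, List.cons_prefix_cons] at hlast
          · obtain ⟨y, -, hy⟩ := List.mem_map.mp h1
            rw [← hy] at hlast
            simp [PySem.Chars.startswith_iff, List.cons_prefix_cons] at hlast
        · have hPnil : P = [] := by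
            rw [hP, List.drop_eq_nil_of_le (by omega), List.map_nil]
          intro _
          rw [hC, hPnil, List.append_nil] at h2
          rcases List.mem_append.mp h2 with h2 | h2
          · obtain ⟨p, -, hp⟩ := List.mem_map.mp h2
            rw [← hp]
            unfold pvB_pairLines
            by_cases hpq : p.1 = p.2
            · rw [if_pos hpq]; rw [Bool.eq_false_iff]
              simp [PySem.Chars.startswith_iff, List.cons_prefix_cons]
            · rw [if_neg hpq]; rw [Bool.eq_false_iff]
              simp [PySem.Chars.startswith_iff, List.cons_prefix_cons]
          · obtain ⟨x, -, hx⟩ := List.mem_map.mp h2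
            rw [← hx]; rw [Bool.eq_false_iff]
            simp [PySem.Chars.startswith_iff, List.cons_prefix_cons]
      have hK := pvB_take_cut maxL C out0 hok hch (by rw [hout0len]; omega)
        (by rw [← hfulldef]; exact hge)
      rw [← hfulldef] at hK
      have hcut0 : max 2 maxL = maxL := by omega
      rw [hK, hcut0]
      have hfn : maxL.toNat ≤ full.length := by omega
      by_cases hcond : maxL < (full.length : Int)
          ∧ PySem.Str.startswith (PySem.List.pyGetD full maxL "") "+ " = true
          ∧ PySem.Str.startswith (PySem.List.pyGetD full (maxL - 1) "") "- " = true
      · rw [if_pos hcond, if_pos hcond,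
          show (maxL + 1).toNat = maxL.toNat + 1 from by omega,
          if_pos (by rw [List.length_take]; omega)]
      · rw [if_neg hcond, if_neg hcond,
          if_pos (by rw [List.length_take]; omega)]
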